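-- pv_equiv track=rewrite | github.com/ZsEun/CST_simplifier | code/shield_can_dialog.py | classify_shield_components
-- ===== SOURCE A (Python) =====
-- def classify_shield_components(all_solids):
--     """Classify solids into cover/frame/one_piece by keyword matching.
--
--     Args:
--         all_solids: list of (comp_path, solid_name) tuples
--
--     Returns:
--         dict with keys "cover", "frame", "one_piece", each a list of
--         {"comp": comp_path, "solid": solid_name, "shape": "comp:solid"}
--     """
--     result = {"cover": [], "frame": [], "one_piece": []}
--
--     for comp, solid in all_solids:
--         name_upper = solid.upper()
--         path_upper = comp.upper()
--         full = f"{path_upper}/{name_upper}"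
--
--         is_shield = "SHIELD" in full
--         is_cover = "COVER" in name_upper
--         is_frame = "FRAM" in name_upper
--
--         entry = {"comp": comp, "solid": solid, "shape": f"{comp}:{solid}"}
--
--         if is_cover and is_shield:
--             result["cover"].append(entry)
--         elif is_frame and is_shield:
--             result["frame"].append(entry)
--         elif is_shield:
--             result["one_piece"].append(entry)
--
--     return result
-- ===== SOURCE B (Python) =====
-- def classify_shield_components(all_solids):
--     """Classify solids into cover/frame/one_piece by keyword matching.
--
--     Three independent filtering passes instead of one branching loop;
--     the elif priority becomes explicit negations.
--     """
--     def entry(comp, solid):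
--         return {"comp": comp, "solid": solid, "shape": f"{comp}:{solid}"}
--
--     def shield(comp, solid):
--         return "SHIELD" in f"{comp.upper()}/{solid.upper()}"
--
--     def cover(solid):
--         return "COVER" in solid.upper()
--
--     def frame(solid):
--         return "FRAM" in solid.upper()
--
--     return {
--         "cover": [entry(c, s) for c, s in all_solids
--                   if shield(c, s) and cover(s)],
--         "frame": [entry(c, s) for c, s in all_solids
--                   if shield(c, s) and frame(s) and not cover(s)],
--         "one_piece": [entry(c, s) for c, s in all_solids
--                       if shield(c, s) and not cover(s) and not frame(s)],
--     }
-- ===== Notes on version B (the rewrite author's own statement) =====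
-- stated objective: simpler
-- what changed: Replaced the single branching accumulation loop over a mutable result dict by three independent filtering comprehensions (one per category) with the elif priority made explicit as negations.
import Mathlib
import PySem

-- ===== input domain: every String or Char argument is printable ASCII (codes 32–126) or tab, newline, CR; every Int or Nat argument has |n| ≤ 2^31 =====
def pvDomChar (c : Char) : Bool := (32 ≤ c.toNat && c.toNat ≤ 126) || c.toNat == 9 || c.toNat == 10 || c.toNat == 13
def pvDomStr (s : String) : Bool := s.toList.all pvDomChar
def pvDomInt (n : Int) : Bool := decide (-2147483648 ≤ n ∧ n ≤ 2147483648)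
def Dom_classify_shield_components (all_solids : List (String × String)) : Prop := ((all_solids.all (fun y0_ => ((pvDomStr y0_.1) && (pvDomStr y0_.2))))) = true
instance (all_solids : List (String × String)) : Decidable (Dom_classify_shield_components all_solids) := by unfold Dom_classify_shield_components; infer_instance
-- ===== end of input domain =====

-- ===== PORT A =====
-- B replaces A's single branching accumulation loop by three independent filtering passes (simpler decomposition).
def classify_shield_components (all_solids : List (String × String)) : List (String × List (List (String × String))) :=
  let res := all_solids.foldl (fun (acc : List (List (String × String)) × List (List (String × String)) × List (List (String × String))) p =>
    let comp := p.1
    let solid := p.2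
    let name_upper := PySem.Str.upper solid
    let path_upper := PySem.Str.upper comp
    let full := path_upper ++ "/" ++ name_upper
    let is_shield := PySem.Str.isIn "SHIELD" full
    let is_cover := PySem.Str.isIn "COVER" name_upper
    let is_frame := PySem.Str.isIn "FRAM" name_upper
    let entry := [("comp", comp), ("solid", solid), ("shape", comp ++ ":" ++ solid)]
    if is_cover && is_shield then (acc.1 ++ [entry], acc.2.1, acc.2.2)
    else if is_frame && is_shield then (acc.1, acc.2.1 ++ [entry], acc.2.2)
    else if is_shield then (acc.1, acc.2.1, acc.2.2 ++ [entry])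
    else acc) ([], [], [])
  [("cover", res.1), ("frame", res.2.1), ("one_piece", res.2.2)]

-- ===== PORT B =====
def pvEntry (comp solid : String) : List (String × String) :=
  [("comp", comp), ("solid", solid), ("shape", comp ++ ":" ++ solid)]

def pvShield (comp solid : String) : Bool :=
  PySem.Str.isIn "SHIELD" (PySem.Str.upper comp ++ "/" ++ PySem.Str.upper solid)

def pvCover (solid : String) : Bool := PySem.Str.isIn "COVER" (PySem.Str.upper solid)

def pvFrame (solid : String) : Bool := PySem.Str.isIn "FRAM" (PySem.Str.upper solid)

def classify_shield_components_alt (all_solids : List (String × String)) : List (String × List (List (String × String))) :=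
  [("cover",
      (all_solids.filter (fun p => pvShield p.1 p.2 && pvCover p.2)).map (fun p => pvEntry p.1 p.2)),
   ("frame",
      (all_solids.filter (fun p => pvShield p.1 p.2 && pvFrame p.2 && !pvCover p.2)).map (fun p => pvEntry p.1 p.2)),
   ("one_piece",
      (all_solids.filter (fun p => pvShield p.1 p.2 && !pvCover p.2 && !pvFrame p.2)).map (fun p => pvEntry p.1 p.2))]




def Spec_classify_shield_components (all_solids : List (String × String)) (out : List (String × List (List (String × String)))) : Prop := out = classify_shield_components_alt all_solids
instance (all_solids : List (String × String)) (out : List (String × List (List (String × String)))) : Decidable (Spec_classify_shield_components all_solids out) := by unfold Spec_classify_shield_components; infer_instance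

-- ===== CLAIM (what is proved, stated in full; the proofs are below) =====
def Claim_equal_classify_shield_components : Prop := ∀ (all_solids : List (String × String)), Dom_classify_shield_components all_solids → Spec_classify_shield_components all_solids (classify_shield_components all_solids)

-- ===== LEMMAS AND PROOFS =====

-- ===== VERDICT (by name: the statement is the Claim_ definition above) =====
lemma pvFold_inv (l : List (String × String))
    (c f o : List (List (String × String))) :
    l.foldl (fun (acc : List (List (String × String)) × List (List (String × String)) × List (List (String × String))) p =>
      let comp := p.1
      let solid := p.2
      let name_upper := PySem.Str.upper solid
      let path_upper := PySem.Str.upper comp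
      let full := path_upper ++ "/" ++ name_upper
      let is_shield := PySem.Str.isIn "SHIELD" full
      let is_cover := PySem.Str.isIn "COVER" name_upper
      let is_frame := PySem.Str.isIn "FRAM" name_upper
      let entry := [("comp", comp), ("solid", solid), ("shape", comp ++ ":" ++ solid)]
      if is_cover && is_shield then (acc.1 ++ [entry], acc.2.1, acc.2.2)
      else if is_frame && is_shield then (acc.1, acc.2.1 ++ [entry], acc.2.2)
      else if is_shield then (acc.1, acc.2.1, acc.2.2 ++ [entry])
      else acc) (c, f, o) =
    (c ++ (l.filter (fun p => pvShield p.1 p.2 && pvCover p.2)).map (fun p => pvEntry p.1 p.2),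
     f ++ (l.filter (fun p => pvShield p.1 p.2 && pvFrame p.2 && !pvCover p.2)).map (fun p => pvEntry p.1 p.2),
     o ++ (l.filter (fun p => pvShield p.1 p.2 && !pvCover p.2 && !pvFrame p.2)).map (fun p => pvEntry p.1 p.2)) := by
  induction l generalizing c f o with
  | nil => simp
  | cons hd tl ih =>
    simp only [List.foldl_cons, List.filter_cons]
    have hsh : PySem.Str.isIn "SHIELD" (PySem.Str.upper hd.1 ++ "/" ++ PySem.Str.upper hd.2) = pvShield hd.1 hd.2 := rfl
    have hcv : PySem.Str.isIn "COVER" (PySem.Str.upper hd.2) = pvCover hd.2 := rfl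
    have hfr : PySem.Str.isIn "FRAM" (PySem.Str.upper hd.2) = pvFrame hd.2 := rfl
    rcases hS : pvShield hd.1 hd.2 <;> rcases hC : pvCover hd.2 <;> rcases hF : pvFrame hd.2 <;>
      (simp only [hsh, hcv, hfr, hS, hC, hF, Bool.and_true, Bool.and_false, Bool.and_self, Bool.not_true, Bool.not_false, reduceIte]
       rw [ih]
       simp [pvEntry, List.append_assoc])

theorem classify_shield_components_spec : Claim_equal_classify_shield_components := by
  intro all_solids _
  unfold Spec_classify_shield_components classify_shield_components classify_shield_components_alt
  rw [pvFold_inv]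
  simp
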